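-- pv_equiv track=rewrite | github.com/mayurilk/Natural-Language-Processing | NLP_assignments/a1/a1.py | is_valid_production
-- ===== SOURCE A (Python) =====
-- def is_pos(rule, rules):
--     """
--     Returns:
--       True if this rule is a part-of-speech rule, which is true if none of the
--       RHS symbols appear as LHS symbols in other rules.
--     E.g., if the grammar is:
--     S :- NP VP
--     NP :- N
--     VP :- V
--     N :- dog cat
--     V :- run likes
--
--     Then the final two rules are POS rules.
--     See test_is_pos.
--
--     This function should be used by the is_valid_production function
--     below.
--     """
--     all_rules =[]
--     LHS =[]
--     RHS = []
--     for r in rules: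
--         L = r[0]
--         R = r[1]
--         for s in R:
--             all_rules.append((L, [s]))
--
--     for r in all_rules:
--         LHS.append(r[0])
--         RHS.extend(r[1])
--
--     children = rule[1]
--
--     for c in children:
--         if c in LHS:
--             return False
--     return True
--
-- def is_valid_production(production, rules):
--     """
--     Params:
--       production...A (LHS, RHS) tuple representing one production,
--                    where LHS is a string and RHS is a list of strings.
--       rules........A list of tuples representing the rules of the grammar.
--
--     Returns:
--       True if this production is valid according to the rules of the
--       grammar; False otherwise.
--
--     See test_is_valid_production.
--
--     This function should be used in the is_valid_tree method below.
--     """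
--
--     all_prods = rules[:]
--     for r in rules:
--         L = r[0]
--         R = r[1]
--         for rc in R:
--             new_prod = (L, [rc])
--             if is_pos(new_prod, rules) == True:
--                 all_prods.append(new_prod)
--
--     if production in all_prods:
--         return True
--     else:
--         return False
-- ===== SOURCE B (Python) =====
-- def is_valid_production(production, rules):
--     if production in rules:
--         return True
--     L, R = production
--     if len(R) != 1:
--         return False
--     sym = R[0]
--     lhs = {l for (l, rhs) in rules if rhs}
--     if sym in lhs:
--         return False
--     return any(l == L and sym in rhs for (l, rhs) in rules)
-- ===== Notes on version B (the rewrite author's own statement) =====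
-- stated objective: faster
-- what changed: Instead of materialising the full table of derived single-symbol POS productions (calling is_pos, which itself rebuilds the per-symbol rule list, for every RHS symbol) and testing membership, B tests membership in rules directly, and for a singleton-RHS production checks once that its symbol is not an LHS of any nonempty-RHS rule and appears in some RHS of a rule with the same LHS.
import Mathlib
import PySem

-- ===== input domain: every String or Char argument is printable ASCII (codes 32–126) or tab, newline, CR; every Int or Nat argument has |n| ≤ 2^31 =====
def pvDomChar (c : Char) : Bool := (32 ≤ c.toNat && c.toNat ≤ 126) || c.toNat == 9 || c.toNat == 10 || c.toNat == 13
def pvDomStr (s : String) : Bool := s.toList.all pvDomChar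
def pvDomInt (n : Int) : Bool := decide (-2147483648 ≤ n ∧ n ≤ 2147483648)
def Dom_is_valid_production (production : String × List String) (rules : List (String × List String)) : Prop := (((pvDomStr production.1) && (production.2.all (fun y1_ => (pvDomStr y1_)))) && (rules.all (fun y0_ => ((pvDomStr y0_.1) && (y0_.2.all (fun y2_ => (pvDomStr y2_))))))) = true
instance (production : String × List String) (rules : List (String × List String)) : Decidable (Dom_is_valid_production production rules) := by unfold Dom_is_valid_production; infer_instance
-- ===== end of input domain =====

-- B replaces A's materialisation of the whole derived-POS-production table with a direct
-- short-circuiting membership test plus one scan (objective: faster; same return value everywhere).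

-- ===== PORT A =====
-- (A's local variable RHS inside is_pos is computed but never used; it is omitted here.)
def is_pos (rule : String × List String) (rules : List (String × List String)) : Bool :=
  let all_rules := rules.foldl (fun acc r =>
    r.2.foldl (fun acc2 s => acc2 ++ [(r.1, [s])]) acc) []
  let LHS := all_rules.foldl (fun acc r => acc ++ [r.1]) []
  let children := rule.2
  children.all (fun c => !(LHS.contains c))

def is_valid_production (production : String × List String) (rules : List (String × List String)) : Bool :=
  let all_prods := rules.foldl (fun acc r =>
    r.2.foldl (fun acc2 rc =>
      if is_pos (r.1, [rc]) rules then acc2 ++ [(r.1, [rc])] else acc2) acc) rules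
  all_prods.contains production

-- ===== PORT B =====
def is_valid_production_alt (production : String × List String) (rules : List (String × List String)) : Bool :=
  if rules.contains production then true
  else
    match production with
    | (L, [sym]) =>
      let lhs : PySem.Set String :=
        PySem.Set.ofList (rules.filterMap (fun r => if !r.2.isEmpty then some r.1 else none))
      if PySem.Set.contains lhs sym then false
      else rules.any (fun r => r.1 == L && r.2.contains sym)
    | _ => false

-- ===== PRECONDITION & SPEC =====
def Spec_is_valid_production (production : String × List String) (rules : List (String × List String)) (out : Bool) : Prop := out = is_valid_production_alt production rules
instance (production : String × List String) (rules : List (String × List String)) (out : Bool) : Decidable (Spec_is_valid_production production rules out) := by unfold Spec_is_valid_production; infer_instance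

-- ===== CLAIM (what is proved, stated in full; the proofs are below) =====
def Claim_equal_is_valid_production : Prop := ∀ (production : String × List String) (rules : List (String × List String)), Dom_is_valid_production production rules → Spec_is_valid_production production rules (is_valid_production production rules)

-- ===== LEMMAS AND PROOFS =====

-- A's is_pos on a singleton-RHS rule checks exactly "the symbol is not the LHS of any rule with nonempty RHS".
theorem is_pos_singleton (L sym : String) (rules : List (String × List String)) :
    is_pos (L, [sym]) rules
      = !(rules.any (fun r => !r.2.isEmpty && r.1 == sym)) := by
  simp only [is_pos, PySem.List.foldl_append_singleton_eq_map,
    PySem.List.foldl_append_eq_flatMap, List.nil_append]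
  rw [Bool.eq_iff_iff]
  simp
  constructor
  · intro h a b hb hne heq
    subst heq
    obtain ⟨y, hy⟩ := List.exists_mem_of_ne_nil b hne
    exact h b hb y hy
  · intro h x hx y hy
    exact (h sym x hx (by rintro rfl; exact List.not_mem_nil hy)) rfl

-- membership in A's all_prods list, as "in rules, or a derived POS singleton production"
theorem mem_all_prods (production : String × List String) (rules : List (String × List String)) :
    (rules.foldl (fun acc r =>
      r.2.foldl (fun acc2 rc =>
        if is_pos (r.1, [rc]) rules then acc2 ++ [(r.1, [rc])] else acc2) acc) rules).contains production
    = (rules.contains production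
        || rules.any (fun r => r.2.any (fun rc =>
            is_pos (r.1, [rc]) rules && production == (r.1, [rc])))) := by
  simp only [PySem.List.foldl_append_if, PySem.List.foldl_append_eq_flatMap]
  rw [Bool.eq_iff_iff]
  simp
  constructor
  · rintro (h | ⟨a, b, hb, x, ⟨hx, hp⟩, rfl⟩)
    · exact Or.inl h
    · exact Or.inr ⟨a, b, hb, x, hx, hp, rfl⟩
  · rintro (h | ⟨a, b, hb, x, hx, hp, rfl⟩)
    · exact Or.inl h
    · exact Or.inr ⟨a, b, hb, x, ⟨hx, hp⟩, rfl⟩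

theorem ab_agree (production : String × List String) (rules : List (String × List String)) :
    is_valid_production production rules = is_valid_production_alt production rules := by
  obtain ⟨L, R⟩ := production
  simp only [is_valid_production, mem_all_prods, is_valid_production_alt]
  by_cases hmem : (L, R) ∈ rules
  · simp [hmem]
  · rw [if_neg (by simpa [List.contains_iff_mem] using hmem)]
    match R with
    | [] =>
      simp [hmem]
    | x :: y :: t =>
      simp [hmem]
    | [sym] =>
      rw [Bool.eq_iff_iff]
      simp [hmem, is_pos_singleton, PySem.Set.contains]
      constructor
      · rintro ⟨b, hb, hs, hall⟩
        exact ⟨fun x hx => by by_contra hne; exact hall sym x hx hne rfl, b, hb, hs⟩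
      · rintro ⟨hall, b, hb, hs⟩
        exact ⟨b, hb, hs, fun a c hc hne heq => hne (by subst heq; exact hall c hc)⟩

-- ===== VERDICT (by name: the statement is the Claim_ definition above) =====
theorem is_valid_production_spec : Claim_equal_is_valid_production := by
  intro production rules _
  exact ab_agree production rules
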